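-- pv_equiv track=rewrite | github.com/sloth30799/Advent-of-code | 2023/day14/part2.py | tilt_vertical
-- ===== SOURCE A (Python) =====
-- def tilt_to(line, direction):
--     mini_strings = line.split('#')
--     result = []
--
--     for mini in mini_strings:
--         if direction == 'front':
--             sorted_mini = sorted(list(mini), key=lambda x: (x != 'O', x))
--         else:
--             sorted_mini = sorted(list(mini), key=lambda x: (x == 'O', x))
--
--         result.append(''.join(sorted_mini))
--
--     return '#'.join(result)
--
-- def tilt_vertical(board, direction):
--     new_board = []
--
--     for line in zip(*board):
--         if direction == 'north':
--             line = tilt_to(''.join(line), 'front')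
--         else:
--             line = tilt_to(''.join(line), 'back')
--
--         new_board.append(line)
--
--     new_board = list(zip(*new_board))
--
--     return new_board
-- ===== SOURCE B (Python) =====
-- def _tilt_line(line, o_first):
--     parts = []
--     for seg in line.split('#'):
--         cnt = {}
--         for ch in seg:
--             cnt[ch] = cnt.get(ch, 0) + 1
--         rest = ''.join(ch * cnt[ch] for ch in sorted(cnt) if ch != 'O')
--         run = 'O' * cnt.get('O', 0)
--         parts.append(run + rest if o_first else rest + run)
--     return '#'.join(parts)
--
-- def tilt_vertical(board, direction):
--     o_first = direction == 'north'
--     cols = [_tilt_line(''.join(col), o_first) for col in zip(*board)]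
--     return list(zip(*cols))
-- ===== Notes on version B (the rewrite author's own statement) =====
-- stated objective: alternative
-- what changed: Per '#'-segment, A sorts all characters with a tuple key (comparison sort); B counts characters in one pass into a dict and emits the 'O'-run plus the remaining characters grouped by sorted distinct key (counting sort).
import Mathlib
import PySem

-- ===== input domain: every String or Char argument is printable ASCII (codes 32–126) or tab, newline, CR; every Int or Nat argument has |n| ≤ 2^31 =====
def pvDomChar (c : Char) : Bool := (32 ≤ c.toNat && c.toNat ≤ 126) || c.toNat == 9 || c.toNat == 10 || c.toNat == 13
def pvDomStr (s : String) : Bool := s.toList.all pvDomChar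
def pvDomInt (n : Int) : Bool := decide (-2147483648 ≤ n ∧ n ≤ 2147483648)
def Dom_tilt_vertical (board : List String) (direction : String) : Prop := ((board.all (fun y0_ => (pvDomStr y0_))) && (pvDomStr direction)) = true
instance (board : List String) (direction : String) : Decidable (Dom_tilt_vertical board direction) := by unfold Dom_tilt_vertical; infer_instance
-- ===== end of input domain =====

-- B replaces A's per-segment comparison sort (sorted with a tuple key) by a one-pass
-- character count per segment followed by a grouped emit (counting sort); return value only.

-- shared transliteration of Python's zip(*rows): truncate all rows to the shortest
def pyHeadsTails {α : Type} : List (List α) → Option (List α × List (List α))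
  | [] => some ([], [])
  | [] :: _ => none
  | (a :: t) :: rest =>
    match pyHeadsTails rest with
    | some (hs, ts) => some (a :: hs, t :: ts)
    | none => none

def pyzip {α : Type} : List (List α) → List (List α)
  | [] => []
  | [] :: _ => []
  | (a :: t) :: rest =>
    match pyHeadsTails rest with
    | none => []
    | some (hs, ts) => (a :: hs) :: pyzip (t :: ts)
termination_by ls => (ls.headD []).length

-- ===== PORT A =====
def tilt_to (line : List Char) (direction : String) : List Char :=
  let minis := PySem.Chars.splitOn line ['#']
  let result := minis.foldl (fun acc mini =>
    let sortedMini :=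
      if direction == "front" then
        PySem.List.sorted mini (fun x => toLex (decide (x ≠ 'O'), x))
      else
        PySem.List.sorted mini (fun x => toLex (decide (x = 'O'), x))
    acc ++ [sortedMini]) []
  PySem.Chars.join ['#'] result

def tilt_vertical (board : List String) (direction : String) : List (List String) :=
  let new_board := (pyzip (board.map String.toList)).foldl (fun acc line =>
    let line := if direction == "north" then tilt_to line "front" else tilt_to line "back"
    acc ++ [line]) []
  (pyzip new_board).map (fun row => row.map (fun c => String.ofList [c]))

-- ===== PORT B =====
def tilt_line_alt (line : List Char) (oFirst : Bool) : List Char :=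
  let parts := (PySem.Chars.splitOn line ['#']).map (fun seg =>
    let cnt : PySem.Dict Char Int :=
      seg.foldl (fun d ch => d.insert ch (d.getD ch 0 + 1)) PySem.Dict.empty
    let rest := ((PySem.List.sorted cnt.keys (fun x => x)).filter (fun ch => ch != 'O')).flatMap
      (fun ch => List.replicate (cnt.getD ch 0).toNat ch)
    let run := List.replicate (cnt.getD 'O' 0).toNat 'O'
    if oFirst then run ++ rest else rest ++ run)
  PySem.Chars.join ['#'] parts

def tilt_vertical_alt (board : List String) (direction : String) : List (List String) :=
  let oFirst := direction == "north"
  let cols := (pyzip (board.map String.toList)).map (fun col => tilt_line_alt col oFirst)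
  (pyzip cols).map (fun row => row.map (fun c => String.ofList [c]))

-- ===== PRECONDITION & SPEC =====
def Spec_tilt_vertical (board : List String) (direction : String) (out : List (List String)) : Prop := out = tilt_vertical_alt board direction
instance (board : List String) (direction : String) (out : List (List String)) : Decidable (Spec_tilt_vertical board direction out) := by unfold Spec_tilt_vertical; infer_instance

-- ===== CLAIM (what is proved, stated in full; the proofs are below) =====
def Claim_equal_tilt_vertical : Prop := ∀ (board : List String) (direction : String), Dom_tilt_vertical board direction → Spec_tilt_vertical board direction (tilt_vertical board direction)

-- ===== LEMMAS AND PROOFS =====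

theorem keyF_inj : Function.Injective (fun x : Char => toLex (decide (x ≠ 'O'), x)) := by
  intro a b h
  have := congrArg (fun z : Lex (Bool × Char) => (ofLex z).2) h
  simpa using this

theorem keyB_inj : Function.Injective (fun x : Char => toLex (decide (x = 'O'), x)) := by
  intro a b h
  have := congrArg (fun z : Lex (Bool × Char) => (ofLex z).2) h
  simpa using this

theorem count_flatMap_replicate (ks : List Char) (hnd : ks.Nodup) (n : Char → Nat) (c : Char) :
    (ks.flatMap fun k => List.replicate (n k) k).count c = if c ∈ ks then n c else 0 := by
  induction ks with
  | nil => simp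
  | cons k t ih =>
    rcases List.nodup_cons.mp hnd with ⟨hk, ht⟩
    by_cases hc : c = k
    · subst hc
      simp [List.count_append, ih ht, hk]
    · simp [List.count_append, List.count_replicate, ih ht, hc, Ne.symm hc]

theorem pairwise_flatMap_replicate {R : Char → Char → Prop} (ks : List Char) (n : Char → Nat)
    (hR : ks.Pairwise R) (hrefl : ∀ a ∈ ks, R a a) :
    (ks.flatMap fun k => List.replicate (n k) k).Pairwise R := by
  induction ks with
  | nil => simp
  | cons k t ih =>
    simp only [List.flatMap_cons]
    rw [List.pairwise_append]
    refine ⟨List.pairwise_replicate.2 (Or.inr (hrefl k (by simp))),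
      ih hR.of_cons (fun a ha => hrefl a (by simp [ha])), ?_⟩
    intro a ha b hb
    obtain rfl := List.eq_of_mem_replicate ha
    obtain ⟨c, hc, hbc⟩ := List.mem_flatMap.mp hb
    obtain rfl := List.eq_of_mem_replicate hbc
    exact (List.pairwise_cons.mp hR).1 _ hc

theorem nodup_filtered (seg : List Char) :
    ((PySem.List.sorted (PySem.Set.ofList seg) (fun x => x)).filter (fun c => c != 'O')).Nodup := by
  have h := PySem.List.sorted_ofList_pairwise_lt (κ := Char) seg
  have h2 : (PySem.List.sorted (PySem.Set.ofList seg) (fun x => x)).Nodup :=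
    h.imp (fun hlt => ne_of_lt hlt)
  exact h2.filter _

theorem mem_filtered (seg : List Char) (c : Char) :
    c ∈ (PySem.List.sorted (PySem.Set.ofList seg) (fun x => x)).filter (fun c => c != 'O') ↔
      c ∈ seg ∧ c ≠ 'O' := by
  rw [List.mem_filter]
  constructor
  · rintro ⟨hm, hne⟩
    refine ⟨?_, by simpa using hne⟩
    have := (PySem.List.sorted_perm (PySem.Set.ofList seg) (fun x => x) false).mem_iff.mp hm
    simpa [PySem.Set.mem_ofList] using this
  · rintro ⟨hm, hne⟩
    refine ⟨?_, by simpa using hne⟩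
    exact (PySem.List.sorted_perm (PySem.Set.ofList seg) (fun x => x) false).mem_iff.mpr
      (by simpa [PySem.Set.mem_ofList] using hm)

theorem perm_decomp (seg : List Char) :
    (List.replicate (seg.count 'O') 'O' ++
      ((PySem.List.sorted (PySem.Set.ofList seg) (fun x => x)).filter (fun c => c != 'O')).flatMap
        (fun c => List.replicate (seg.count c) c)).Perm seg := by
  rw [List.perm_iff_count]
  intro c
  rw [List.count_append, count_flatMap_replicate _ (nodup_filtered seg)]
  by_cases hc : c = 'O'
  · subst hc
    simp
  · by_cases hm : c ∈ seg
    · simp [List.count_replicate, hc, hm, Ne.symm hc]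
    · simp [List.count_replicate, hc, hm, Ne.symm hc,
        List.count_eq_zero_of_not_mem hm]

theorem pairwise_filtered_le (seg : List Char) (key : Char → Lex (Bool × Char))
    (hmono : ∀ a b : Char, a ≠ 'O' → b ≠ 'O' → a < b → key a ≤ key b) :
    (((PySem.List.sorted (PySem.Set.ofList seg) (fun x => x)).filter (fun c => c != 'O')).flatMap
      (fun c => List.replicate (seg.count c) c)).Pairwise (fun a b => key a ≤ key b) := by
  refine pairwise_flatMap_replicate (R := fun a b => key a ≤ key b) _ _ ?_ (fun a _ => le_refl _)
  have h := (PySem.List.sorted_ofList_pairwise_lt (κ := Char) seg).filter (fun c => c != 'O')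
  rw [List.Pairwise.and_mem] at h
  rw [List.Pairwise.and_mem]
  refine h.imp ?_
  rintro a b ⟨ha, hb, hlt⟩
  have hna : a ≠ 'O' := by simpa using (List.mem_filter.mp ha).2
  have hnb : b ≠ 'O' := by simpa using (List.mem_filter.mp hb).2
  exact ⟨ha, hb, hmono a b hna hnb hlt⟩

theorem seg_front_proof (seg : List Char) :
    PySem.List.sorted seg (fun x => toLex (decide (x ≠ 'O'), x)) =
      List.replicate (seg.count 'O') 'O' ++
        ((PySem.List.sorted (PySem.Set.ofList seg) (fun x => x)).filter (fun c => c != 'O')).flatMap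
          (fun c => List.replicate (seg.count c) c) := by
  set key : Char → Lex (Bool × Char) := fun x => toLex (decide (x ≠ 'O'), x) with hkey
  set ys := List.replicate (seg.count 'O') 'O' ++
    ((PySem.List.sorted (PySem.Set.ofList seg) (fun x => x)).filter (fun c => c != 'O')).flatMap
      (fun c => List.replicate (seg.count c) c) with hys
  have hpw : ys.Pairwise (fun a b => key a ≤ key b) := by
    rw [hys, List.pairwise_append]
    refine ⟨List.pairwise_replicate.2 (Or.inr (le_refl _)), ?_, ?_⟩
    · apply pairwise_filtered_le
      intro a b hna hnb hlt
      simp only [hkey, Prod.Lex.toLex_le_toLex]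
      exact Or.inr ⟨by simp [hna, hnb], le_of_lt hlt⟩
    · intro a ha b hb
      obtain rfl := List.eq_of_mem_replicate ha
      obtain ⟨c, hc, hbc⟩ := List.mem_flatMap.mp hb
      obtain rfl := List.eq_of_mem_replicate hbc
      have hnb : b ≠ 'O' := ((mem_filtered seg b).mp hc).2
      simp only [hkey, Prod.Lex.toLex_le_toLex]
      left
      simp [hnb]
  calc PySem.List.sorted seg key = PySem.List.sorted ys key :=
        PySem.List.sorted_eq_sorted_of_perm seg ys key keyF_inj (perm_decomp seg).symm
    _ = ys := PySem.List.sorted_eq_self_of_pairwise ys key hpw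

theorem seg_back_proof (seg : List Char) :
    PySem.List.sorted seg (fun x => toLex (decide (x = 'O'), x)) =
      ((PySem.List.sorted (PySem.Set.ofList seg) (fun x => x)).filter (fun c => c != 'O')).flatMap
          (fun c => List.replicate (seg.count c) c) ++
        List.replicate (seg.count 'O') 'O' := by
  set key : Char → Lex (Bool × Char) := fun x => toLex (decide (x = 'O'), x) with hkey
  set ys := ((PySem.List.sorted (PySem.Set.ofList seg) (fun x => x)).filter (fun c => c != 'O')).flatMap
      (fun c => List.replicate (seg.count c) c) ++
    List.replicate (seg.count 'O') 'O' with hys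
  have hpw : ys.Pairwise (fun a b => key a ≤ key b) := by
    rw [hys, List.pairwise_append]
    refine ⟨?_, List.pairwise_replicate.2 (Or.inr (le_refl _)), ?_⟩
    · apply pairwise_filtered_le
      intro a b hna hnb hlt
      simp only [hkey, Prod.Lex.toLex_le_toLex]
      exact Or.inr ⟨by simp [hna, hnb], le_of_lt hlt⟩
    · intro a ha b hb
      obtain ⟨c, hc, hac⟩ := List.mem_flatMap.mp ha
      obtain rfl := List.eq_of_mem_replicate hac
      obtain rfl := List.eq_of_mem_replicate hb
      have hna : a ≠ 'O' := ((mem_filtered seg a).mp hc).2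
      simp only [hkey, Prod.Lex.toLex_le_toLex]
      left
      simp [hna]
  have hperm : (ys).Perm seg := by
    rw [hys]
    exact (List.perm_append_comm.trans (perm_decomp seg))
  calc PySem.List.sorted seg key = PySem.List.sorted ys key :=
        PySem.List.sorted_eq_sorted_of_perm seg ys key keyB_inj hperm.symm
    _ = ys := PySem.List.sorted_eq_self_of_pairwise ys key hpw

theorem line_eq (line : List Char) (oFirst : Bool) :
    tilt_to line (if oFirst then "front" else "back") = tilt_line_alt line oFirst := by
  simp only [tilt_to, tilt_line_alt]
  rw [PySem.List.foldl_append_singleton_eq_map]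
  simp only [List.nil_append]
  refine congrArg _ (List.map_congr_left ?_)
  intro mini _
  have hg : ∀ ch : Char,
      ((mini.foldl (fun d ch => d.insert ch (d.getD ch 0 + 1)) (PySem.Dict.empty : PySem.Dict Char Int)).getD ch 0) = (mini.count ch : Int) := by
    intro ch
    rw [PySem.Dict.getD_foldl_insert_add_one]
    simp [pysem]
  have hk : (mini.foldl (fun d ch => d.insert ch (d.getD ch 0 + 1)) (PySem.Dict.empty : PySem.Dict Char Int)).keys = PySem.Set.ofList mini := by
    rw [PySem.Dict.keys_foldl_insert]
    simp [pysem]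
  cases oFirst with
  | true =>
    simp only [hg, hk, Int.toNat_natCast, reduceIte]
    exact seg_front_proof mini
  | false =>
    simp only [hg, hk, Int.toNat_natCast]
    norm_num
    exact seg_back_proof mini

-- ===== VERDICT (by name: the statement is the Claim_ definition above) =====
theorem tilt_vertical_spec : Claim_equal_tilt_vertical := by
  intro board direction _
  unfold Spec_tilt_vertical tilt_vertical tilt_vertical_alt
  rw [PySem.List.foldl_append_singleton_eq_map]
  simp only [List.nil_append]
  refine congrArg _ (congrArg pyzip (List.map_congr_left ?_))
  intro col _
  by_cases h : direction == "north"
  · simpa [h] using line_eq col true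
  · simpa [h] using line_eq col false
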